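-- pv_equiv track=rewrite | github.com/Natramit/Looking_For | Tools/Python_Creater/Release_DEV_Maker.py | rm_data
-- ===== SOURCE A (Python) =====
-- def rm_data(code,type_in):
--     return_v = ""
--     type_leave = '0'
--     type_leave_leave = '0'
--     v_leave = ''
--     for c,t in zip(code,type_in):
--         if t == '2':
--             if type_leave == '2':
--                 if type_leave_leave == '2':
--                     v_leave = ' '
--         return_v = return_v + v_leave
--         type_leave_leave = type_leave
--         type_leave = t
--         v_leave = c
--     return_v = return_v + v_leave
--     return return_v
-- ===== SOURCE B (Python) =====
-- def rm_data(code, type_in):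
--     # Stateless sliding-window rewrite: char j becomes ' ' exactly when it sits
--     # strictly inside the zipped region and types j-1, j, j+1 are all '2'.
--     n = min(len(code), len(type_in))
--     out = []
--     for j in range(n):
--         if 0 < j < n - 1 and type_in[j-1] == type_in[j] == type_in[j+1] == '2':
--             out.append(' ')
--         else:
--             out.append(code[j])
--     return ''.join(out)
-- ===== Notes on version B (the rewrite author's own statement) =====
-- stated objective: simpler
-- what changed: Replaces A's delayed-emission shift-register state machine (v_leave/type_leave/type_leave_leave carried across iterations) with a stateless single pass that decides each output character directly from the three-type window type_in[j-1..j+1] around its position.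
import Mathlib
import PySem

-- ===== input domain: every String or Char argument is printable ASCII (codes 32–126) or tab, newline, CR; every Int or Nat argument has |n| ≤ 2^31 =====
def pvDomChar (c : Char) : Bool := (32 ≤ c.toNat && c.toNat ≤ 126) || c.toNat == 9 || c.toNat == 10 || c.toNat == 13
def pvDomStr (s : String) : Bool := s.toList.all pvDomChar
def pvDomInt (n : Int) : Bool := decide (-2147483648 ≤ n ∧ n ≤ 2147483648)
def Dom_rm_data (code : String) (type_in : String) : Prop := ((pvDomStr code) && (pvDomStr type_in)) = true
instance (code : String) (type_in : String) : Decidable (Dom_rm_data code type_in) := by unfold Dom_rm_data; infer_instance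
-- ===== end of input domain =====

-- B replaces A's delayed-emission shift-register state (v_leave/type_leave/type_leave_leave)
-- with a stateless three-type window test at each position; objective: simpler.


-- ===== PORT A =====
-- loop body of A: state = (return_v, type_leave, type_leave_leave, v_leave)
def stepA (acc : List Char × Char × Char × List Char) (ct : Char × Char) :
    List Char × Char × Char × List Char :=
  let vl :=
    if ct.2 = '2' then
      if acc.2.1 = '2' then
        if acc.2.2.1 = '2' then [' '] else acc.2.2.2
      else acc.2.2.2
    else acc.2.2.2
  (acc.1 ++ vl, ct.2, acc.2.1, [ct.1])

def rm_data (code : String) (type_in : String) : String :=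
  let st := (code.toList.zip type_in.toList).foldl stepA ([], '0', '0', [])
  String.mk (st.1 ++ st.2.2.2)

-- ===== PORT B =====
def rm_data_alt (code : String) (type_in : String) : String :=
  let cs := code.toList
  let ts := type_in.toList
  let n := min cs.length ts.length
  String.mk ((List.range n).map (fun j =>
    if 0 < j ∧ j < n - 1 ∧ ts.getD (j-1) ' ' = '2' ∧ ts.getD j ' ' = '2' ∧ ts.getD (j+1) ' ' = '2'
    then ' ' else cs.getD j ' '))

-- ===== PRECONDITION & SPEC =====
def Spec_rm_data (code : String) (type_in : String) (out : String) : Prop := out = rm_data_alt code type_in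
instance (code : String) (type_in : String) (out : String) : Decidable (Spec_rm_data code type_in out) := by unfold Spec_rm_data; infer_instance

-- ===== CLAIM (what is proved, stated in full; the proofs are below) =====
def Claim_equal_rm_data : Prop := ∀ (code : String) (type_in : String), Dom_rm_data code type_in → Spec_rm_data code type_in (rm_data code type_in)

-- ===== LEMMAS AND PROOFS =====

-- emitted suffix of A's loop from state (·, tl, tll, vl)
def gA : List (Char × Char) → Char → Char → List Char → List Char
  | [], _, _, vl => vl
  | (c, t) :: ps, tl, tll, vl =>
      (if t = '2' ∧ tl = '2' ∧ tll = '2' then [' '] else vl) ++ gA ps t tl [c]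

-- one-lookbehind window form: emits each char, spacing it when prev/cur/next types are all '2'
def headT2 : List (Char × Char) → Bool
  | (_, t') :: _ => t' == '2'
  | [] => false

def W : List (Char × Char) → Char → List Char
  | [], _ => []
  | (c, t) :: ps, tl =>
      (if tl = '2' ∧ t = '2' ∧ headT2 ps = true then ' ' else c) :: W ps t

theorem fold_gA (ps : List (Char × Char)) (rv : List Char) (tl tll : Char) (vl : List Char) :
    (ps.foldl stepA (rv, tl, tll, vl)).1 ++ (ps.foldl stepA (rv, tl, tll, vl)).2.2.2
      = rv ++ gA ps tl tll vl := by
  induction ps generalizing rv tl tll vl with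
  | nil => simp [gA]
  | cons p ps ih =>
    obtain ⟨c, t⟩ := p
    simp only [List.foldl_cons, stepA, gA, ih]
    by_cases h1 : t = '2' <;> by_cases h2 : tl = '2' <;> by_cases h3 : tll = '2' <;>
      simp [h1, h2, h3]

theorem gA_eq_W (ps : List (Char × Char)) (t tl : Char) (c : Char) :
    gA ps t tl [c]
      = (if headT2 ps = true ∧ t = '2' ∧ tl = '2' then ' ' else c) :: W ps t := by
  induction ps generalizing t tl c with
  | nil => simp [gA, W, headT2]
  | cons p ps ih =>
    obtain ⟨c', t'⟩ := p
    simp only [gA, ih, W]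
    by_cases h1 : t' = '2' <;> by_cases h2 : t = '2' <;> by_cases h3 : tl = '2' <;>
      simp [h1, h2, h3, headT2]

theorem W_length (ps : List (Char × Char)) (tl : Char) : (W ps tl).length = ps.length := by
  induction ps generalizing tl with
  | nil => simp [W]
  | cons p ps ih => obtain ⟨c, t⟩ := p; simp [W, ih]

theorem W_get (ps : List (Char × Char)) (tl : Char) (k : Nat) (hk : k < ps.length) :
    (W ps tl).getD k ' '
      = if ((if k = 0 then tl else (ps.getD (k-1) (' ', ' ')).2) = '2'
            ∧ (ps.getD k (' ', ' ')).2 = '2'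
            ∧ k + 1 < ps.length ∧ (ps.getD (k+1) (' ', ' ')).2 = '2')
        then ' ' else (ps.getD k (' ', ' ')).1 := by
  induction ps generalizing tl k with
  | nil => simp at hk
  | cons p ps ih =>
    obtain ⟨c, t⟩ := p
    cases k with
    | zero =>
      cases ps with
      | nil => simp [W, headT2]
      | cons q ps' =>
        obtain ⟨c', t'⟩ := q
        simp only [W, List.getD_cons_zero, List.getD_cons_succ]
        by_cases h1 : tl = '2' <;> by_cases h2 : t = '2' <;> by_cases h3 : t' = '2' <;>
          simp [h1, h2, h3, headT2]
    | succ k' =>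
      have hk' : k' < ps.length := by simpa using Nat.lt_of_succ_lt_succ hk
      simp only [W, List.getD_cons_succ]
      rw [ih t k' hk']
      rcases k' with _ | k''
      · simp [Nat.lt_iff_add_one_le]
      · simp

theorem main_lists (cs ts : List Char) :
    gA (cs.zip ts) '0' '0' [] = (List.range (min cs.length ts.length)).map (fun j =>
      if 0 < j ∧ j < (min cs.length ts.length) - 1 ∧ ts.getD (j-1) ' ' = '2' ∧ ts.getD j ' ' = '2' ∧ ts.getD (j+1) ' ' = '2'
      then ' ' else cs.getD j ' ') := by
  cases hzip : cs.zip ts with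
  | nil =>
    have h0 : min cs.length ts.length = 0 := by
      have := List.length_zip (l₁ := cs) (l₂ := ts)
      rw [hzip] at this; simpa using this.symm
    simp [gA, h0]
  | cons p rest =>
    obtain ⟨c0, t0⟩ := p
    have hlen : rest.length + 1 = min cs.length ts.length := by
      have := List.length_zip (l₁ := cs) (l₂ := ts)
      rw [hzip] at this; simpa using this
    have hget : ∀ j, j < rest.length + 1 →
        ((c0, t0) :: rest).getD j (' ', ' ') = (cs.getD j ' ', ts.getD j ' ') := by
      intro j hj
      have hj1 : j < (cs.zip ts).length := by rw [hzip]; simpa using hj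
      have hj2 : j < cs.length := lt_of_lt_of_le hj1 (by rw [List.length_zip]; exact Nat.min_le_left _ _)
      have hj3 : j < ts.length := lt_of_lt_of_le hj1 (by rw [List.length_zip]; exact Nat.min_le_right _ _)
      rw [← hzip, List.getD_eq_getElem _ _ hj1, List.getD_eq_getElem _ _ hj2,
          List.getD_eq_getElem _ _ hj3, List.getElem_zip]
    have hg : gA ((c0, t0) :: rest) '0' '0' [] = c0 :: W rest t0 := by
      simp only [gA]
      rw [if_neg (by simp), gA_eq_W, if_neg (by simp), List.nil_append]
    rw [hg, ← hlen]
    apply List.ext_getElem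
    · simp [W_length]
    · intro k h1 h2
      rw [List.getElem_map, List.getElem_range]
      rcases k with _ | m
      · have h0 := hget 0 (by omega)
        simp only [List.getD_cons_zero, Prod.mk.injEq] at h0
        rw [List.getElem_cons_zero, if_neg (by simp)]
        exact h0.1
      · have hm : m < rest.length := by
          rw [List.length_cons, W_length] at h1
          omega
        have lhs1 : (c0 :: W rest t0)[m + 1] = (W rest t0).getD m ' ' := by
          rw [List.getElem_cons_succ, List.getD_eq_getElem]
        rw [lhs1, W_get rest t0 m hm]
        have e1 : rest.getD m (' ', ' ') = ((c0, t0) :: rest).getD (m + 1) (' ', ' ') := rfl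
        have e2 : (if m = 0 then t0 else (rest.getD (m - 1) (' ', ' ')).2)
            = (((c0, t0) :: rest).getD m (' ', ' ')).2 := by
          rcases m with _ | m' <;> simp
        by_cases hb : m + 1 < rest.length
        · have e3 : rest.getD (m + 1) (' ', ' ') = ((c0, t0) :: rest).getD (m + 2) (' ', ' ') := rfl
          rw [e1, e2, e3, hget m (by omega), hget (m + 1) (by omega), hget (m + 2) (by omega)]
          simp only []
          have hc : (0 < m + 1 ∧ m + 1 < rest.length + 1 - 1 ∧ ts.getD (m + 1 - 1) ' ' = '2' ∧
              ts.getD (m + 1) ' ' = '2' ∧ ts.getD (m + 1 + 1) ' ' = '2')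
              ↔ ((ts.getD m ' ' = '2') ∧ ts.getD (m + 1) ' ' = '2' ∧ m + 1 < rest.length ∧ ts.getD (m + 2) ' ' = '2') := by
            constructor
            · rintro ⟨-, h2', h3, h4, h5⟩; exact ⟨by simpa using h3, h4, by omega, by simpa using h5⟩
            · rintro ⟨h3, h4, h5, h6⟩; exact ⟨by omega, by omega, by simpa using h3, h4, by simpa using h6⟩
          rw [if_congr hc rfl rfl]
        · rw [if_neg (fun h => hb h.2.2.1), if_neg (fun h => hb (by simpa using h.2.1))]
          rw [e1, hget (m + 1) (by omega)]

theorem rm_data_spec : Claim_equal_rm_data := by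
  intro code type_in _
  simp only [Spec_rm_data, rm_data, rm_data_alt]
  apply congrArg String.mk
  rw [fold_gA, List.nil_append, main_lists]
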